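-- pv_equiv track=rewrite | github.com/qkrtiger/Programmers | 프로그래머스/1/135808. 과일 장수/과일 장수.py | solution
-- ===== SOURCE A (Python) =====
-- def solution(k, m, score):
--     score.sort(reverse=True)  # 사과 점수를 내림차순으로 정렬합니다.
--     profit = 0  # 최대 이익을 저장할 변수를 초기화합니다.
--
--     boxes = len(score) // m  # 만들 수 있는 상자의 개수를 계산합니다.
--     for i in range(boxes):
--         min_score = score[i * m + m - 1]  # 현재 상자의 최저 사과 점수를 가져옵니다.
--         profit += min_score * m  # 현재 상자의 이익을 누적합니다.
--
--     return profit
-- ===== SOURCE B (Python) =====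
-- def solution(k, m, score):
--     # Count occurrences once, then walk the distinct scores in descending order,
--     # counting the box-minimum positions inside each value block arithmetically
--     # (no per-box loop: a block of c equal apples covers positions [p, p+c)).
--     cnt = {}
--     for s in score:
--         cnt[s] = cnt.get(s, 0) + 1
--     limit = len(score) // m * m  # number of apples that actually get boxed
--     profit = 0
--     p = 0  # positions already consumed in descending order
--     for v in sorted(cnt, reverse=True):
--         c = cnt[v]
--         hi = min(p + c, limit)
--         lo = min(p, limit)
--         # box minima are the positions q with (q + 1) % m == 0; their count in [lo, hi)
--         profit += m * v * (hi // m - lo // m)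
--         p += c
--     return profit
-- ===== Notes on version B (the rewrite author's own statement) =====
-- stated objective: alternative
-- what changed: Replaces the descending sort plus a loop over every box by a hash-map occurrence counter and one walk over the sorted distinct scores, computing the number of box-minimum positions covered by each equal-value block in O(1) with floor-division interval arithmetic.
-- outside the precondition, e.g. on solution(0, -2, [1, 2, 3]): A returns 0, B returns 8; on solution(0, 0, [1]): A raises ZeroDivisionError, B raises ZeroDivisionError
import Mathlib
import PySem

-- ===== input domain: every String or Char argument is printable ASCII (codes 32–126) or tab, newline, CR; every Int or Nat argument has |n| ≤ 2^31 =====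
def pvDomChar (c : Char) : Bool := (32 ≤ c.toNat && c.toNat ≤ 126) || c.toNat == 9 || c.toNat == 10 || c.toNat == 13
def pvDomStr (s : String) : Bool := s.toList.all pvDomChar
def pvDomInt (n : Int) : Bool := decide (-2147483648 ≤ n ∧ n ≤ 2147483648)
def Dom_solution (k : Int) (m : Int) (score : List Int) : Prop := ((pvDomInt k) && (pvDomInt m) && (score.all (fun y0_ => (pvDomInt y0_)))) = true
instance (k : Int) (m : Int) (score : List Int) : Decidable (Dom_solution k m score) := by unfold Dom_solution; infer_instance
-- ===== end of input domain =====

-- B replaces A's descending sort plus per-box loop by an occurrence counter and one walk over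
-- the sorted distinct scores, counting the box-minimum positions inside each equal-value block
-- with floor-division interval arithmetic (objective: alternative). A sorts `score` in place;
-- the equivalence proved here is about the RETURN value only (B does not mutate its argument).

-- ===== PORT A =====
def solution (k : Int) (m : Int) (score : List Int) : Int :=
  let s := PySem.List.sorted score (fun x => x) true
  let boxes := PySem.Int.floordiv (s.length : Int) m
  (PySem.List.pyRange 0 boxes 1).foldl
    (fun profit i => profit + PySem.List.pyGetD s (i * m + m - 1) 0 * m) 0

-- ===== PORT B =====
def solution_alt (k : Int) (m : Int) (score : List Int) : Int :=
  let cnt := score.foldl (fun d s => PySem.Dict.insert d s (PySem.Dict.getD d s 0 + 1)) PySem.Dict.empty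
  let limit := PySem.Int.floordiv (score.length : Int) m * m
  ((PySem.List.sorted (PySem.Dict.keys cnt) (fun x => x) true).foldl
      (fun (st : Int × Int) v =>
        let c := PySem.Dict.getD cnt v 0
        let hi := min (st.2 + c) limit
        let lo := min st.2 limit
        (st.1 + m * v * (PySem.Int.floordiv hi m - PySem.Int.floordiv lo m), st.2 + c))
      (0, 0)).1

-- ===== PRECONDITION & SPEC =====
-- Pre_ excludes m ≤ 0, outside the problem's natural domain (a box holds m ≥ 1 apples):
-- at m = 0 both A and B raise ZeroDivisionError, and for negative m A returns 0 only because
-- the computed box count turns negative and its loop never runs, an artifact of A's implementation.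
def Pre_solution (k : Int) (m : Int) (score : List Int) : Prop := 0 < m
instance (k : Int) (m : Int) (score : List Int) : Decidable (Pre_solution k m score) := by unfold Pre_solution; infer_instance
def pvWitness_solution : Int × Int × List Int := (4, 3, [3, 1, 2, 4, 2])

def Spec_solution (k : Int) (m : Int) (score : List Int) (out : Int) : Prop := out = solution_alt k m score
instance (k : Int) (m : Int) (score : List Int) (out : Int) : Decidable (Spec_solution k m score out) := by unfold Spec_solution; infer_instance

-- ===== CLAIM (what is proved, stated in full; the proofs are below) =====
def Claim_equal_solution : Prop := ∀ (k : Int) (m : Int) (score : List Int), Dom_solution k m score → Pre_solution k m score → Spec_solution k m score (solution k m score)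

-- ===== LEMMAS AND PROOFS =====

-- list sum over a mapped range = Finset sum over the range
theorem pv_sum_map_range (n : Nat) (f : Nat → Int) :
    ((List.range n).map f).sum = ∑ i ∈ Finset.range n, f i := by
  induction n with
  | zero => simp
  | succ n ih => rw [List.range_succ, Finset.sum_range_succ]; simp [ih]

-- count of x in a concatenation of value blocks over distinct values
theorem pv_count_flatMap (ks : List Int) (hnd : ks.Nodup) (f : Int → Nat) (x : Int) :
    (ks.flatMap (fun v => List.replicate (f v) v)).count x
      = if x ∈ ks then f x else 0 := by
  induction ks with
  | nil => simp
  | cons v t ih =>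
    rw [List.flatMap_cons, List.count_append, ih hnd.of_cons]
    rcases eq_or_ne x v with rfl | hne
    · have hxt : x ∉ t := (List.nodup_cons.mp hnd).1
      simp [hxt]
    · simp [List.count_replicate, hne, hne.symm]

-- the blocks of a ≥-ordered key list, expanded, are ≥-ordered
theorem pv_pairwise_flatMap (ks : List Int) (f : Int → Nat)
    (h : ks.Pairwise (fun a b => b ≤ a)) :
    (ks.flatMap (fun v => List.replicate (f v) v)).Pairwise (fun a b : Int => b ≤ a) := by
  induction ks with
  | nil => simp
  | cons v t ih =>
    rw [List.flatMap_cons, List.pairwise_append]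
    refine ⟨List.pairwise_replicate.mpr (Or.inr le_rfl), ih h.of_cons, ?_⟩
    intro a ha b hb
    obtain rfl := List.eq_of_mem_replicate ha
    obtain ⟨w, hw, hbw⟩ := List.mem_flatMap.mp hb
    obtain rfl := List.eq_of_mem_replicate hbw
    exact List.rel_of_pairwise_cons h hw

-- the descending sort of score is the concatenation of the count-sized blocks of its
-- distinct values taken in descending order  (correctness of the counting re-implementation)
theorem pv_desc_blocks (score : List Int) :
    PySem.List.sorted score (fun x => x) true
      = (PySem.List.sorted (PySem.Set.ofList score) (fun x => x) true).flatMap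
          (fun v => List.replicate (score.count v) v) := by
  have hndk : (PySem.List.sorted (PySem.Set.ofList score) (fun x => x) true).Nodup :=
    ((PySem.List.sorted_perm (PySem.Set.ofList score) (fun x => x) true).nodup_iff).mpr
      (PySem.Set.nodup_ofList score)
  apply List.Perm.eq_of_pairwise (le := fun a b : Int => b ≤ a)
  · intro a b _ _ h1 h2; omega
  · exact PySem.List.sorted_pairwise_rev score (fun x => x)
  · exact pv_pairwise_flatMap _ _ (PySem.List.sorted_pairwise_rev _ (fun x => x))
  · refine (PySem.List.sorted_perm score (fun x => x) true).trans (List.perm_iff_count.mpr ?_)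
    intro x
    rw [pv_count_flatMap _ hndk]
    by_cases hx : x ∈ score
    · rw [if_pos]
      rw [PySem.List.mem_sorted, PySem.Set.mem_ofList]; exact hx
    · rw [if_neg, List.count_eq_zero.mpr hx]
      rw [PySem.List.mem_sorted, PySem.Set.mem_ofList]; exact hx

-- 0/1-indicator sum of kk < t over range B
theorem pv_sum_indicator (B t : Nat) :
    ∑ kk ∈ Finset.range B, (if kk < t then (1 : Int) else 0) = ((min B t : Nat) : Int) := by
  induction B with
  | zero => simp
  | succ B ih =>
    rw [Finset.sum_range_succ, ih]
    by_cases h : B < t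
    · rw [if_pos h]; push_cast; omega
    · rw [if_neg h]; push_cast; omega

-- number of box-minimum positions below x, as floor division
theorem pv_count_lt (mn : Nat) (hmn : 0 < mn) (boxes x : Nat) :
    ∑ kk ∈ Finset.range boxes, (if kk * mn + mn - 1 < x then (1 : Int) else 0)
      = ((min x (boxes * mn) / mn : Nat) : Int) := by
  have hcond : ∀ kk : Nat, (kk * mn + mn - 1 < x) ↔ (kk < x / mn) := by
    intro kk
    have hdiv : kk + 1 ≤ x / mn ↔ (kk + 1) * mn ≤ x := Nat.le_div_iff_mul_le hmn
    have hsm : (kk + 1) * mn = kk * mn + mn := by ring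
    rw [hsm] at hdiv
    omega
  have hmin : min x (boxes * mn) / mn = min boxes (x / mn) := by
    rcases le_total x (boxes * mn) with h | h
    · rw [min_eq_left h, min_eq_right]
      exact (Nat.div_le_div_right h).trans_eq (Nat.mul_div_left boxes hmn)
    · rw [min_eq_right h, Nat.mul_div_left boxes hmn, min_eq_left]
      exact (Nat.le_div_iff_mul_le hmn).mpr h
  simp only [hcond]
  rw [pv_sum_indicator, hmin]

-- main loop invariant: starting after p consumed positions whose remaining blocks expand the
-- rest of the descending list, B's walk adds m times the sum of box minima at positions ≥ p
theorem pv_fold (score desc : List Int) (mn n : Nat) (hmn : 0 < mn)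
    (hn : desc.length = n)
    (L : List Int) (p : Nat) (acc : Int)
    (hdrop : desc.drop p = L.flatMap (fun v => List.replicate (score.count v) v)) :
    (L.foldl (fun (st : Int × Int) v =>
        (st.1 + (mn : Int) * v *
            (PySem.Int.floordiv (min (st.2 + (score.count v : Int)) ((n / mn * mn : Nat) : Int)) (mn : Int)
             - PySem.Int.floordiv (min st.2 ((n / mn * mn : Nat) : Int)) (mn : Int)),
         st.2 + (score.count v : Int)))
      (acc, (p : Int))).1
    = acc + ∑ kk ∈ Finset.range (n / mn),
        (if p ≤ kk * mn + mn - 1 then desc.getD (kk * mn + mn - 1) 0 * (mn : Int) else 0) := by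
  induction L generalizing p acc with
  | nil =>
    have hnp : n ≤ p := by
      have := List.drop_eq_nil_iff.mp (by rw [hdrop]; simp)
      omega
    rw [List.foldl_nil, Finset.sum_eq_zero, add_zero]
    intro kk hk
    have hkb : kk < n / mn := Finset.mem_range.mp hk
    have h1 : (kk + 1) * mn ≤ (n / mn) * mn := Nat.mul_le_mul_right mn (by omega)
    have h2 : n / mn * mn ≤ n := Nat.div_mul_le_self n mn
    have hsm : (kk + 1) * mn = kk * mn + mn := by ring
    rw [if_neg]; omega
  | cons v L' ih =>
    rw [List.flatMap_cons] at hdrop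
    set c := score.count v with hc
    -- every position in [p, p+c) of the descending list holds v
    have hblock : ∀ q, p ≤ q → q < p + c → desc.getD q 0 = v := by
      intro q h1 h2
      have hq : q - p < c := by omega
      rw [List.getD_eq_getElem?_getD, show q = p + (q - p) by omega, ← List.getElem?_drop,
        hdrop, List.getElem?_append_left (by simpa using hq)]
      simp [hq]
    have hdrop' : desc.drop (p + c) = L'.flatMap (fun v => List.replicate (score.count v) v) := by
      have h := congrArg (List.drop c) hdrop
      rw [List.drop_drop] at h
      rw [h]; simp
    have hcast : (p : Int) + (score.count v : Int) = ((p + c : Nat) : Int) := by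
      rw [hc]; push_cast; ring
    rw [List.foldl_cons]
    simp only [hcast]
    rw [ih (p + c) _ hdrop']
    -- evaluate the two floor divisions over Nat casts
    simp only [← Nat.cast_min, PySem.Int.floordiv_natCast]
    -- counting identity
    have hC := pv_count_lt mn hmn (n / mn)
    have hsub : (∑ kk ∈ Finset.range (n / mn),
          (if p ≤ kk * mn + mn - 1 then desc.getD (kk * mn + mn - 1) 0 * (mn : Int) else 0))
        - (∑ kk ∈ Finset.range (n / mn),
          (if p + c ≤ kk * mn + mn - 1 then desc.getD (kk * mn + mn - 1) 0 * (mn : Int) else 0))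
        = ((mn : Int) * v) *
            (((min (p + c) (n / mn * mn) / mn : Nat) : Int) - ((min p (n / mn * mn) / mn : Nat) : Int)) := by
      rw [← Finset.sum_sub_distrib, ← hC, ← hC, ← Finset.sum_sub_distrib, Finset.mul_sum]
      apply Finset.sum_congr rfl
      intro kk _
      by_cases h1 : p ≤ kk * mn + mn - 1
      · by_cases h2 : p + c ≤ kk * mn + mn - 1
        · rw [if_pos h1, if_pos h2, if_neg (by omega : ¬ kk * mn + mn - 1 < p + c),
            if_neg (by omega : ¬ kk * mn + mn - 1 < p)]
          ring
        · rw [if_pos h1, if_neg h2, if_pos (by omega : kk * mn + mn - 1 < p + c),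
            if_neg (by omega : ¬ kk * mn + mn - 1 < p),
            hblock _ h1 (by omega)]
          ring
      · rw [if_neg h1, if_neg (by omega : ¬ p + c ≤ kk * mn + mn - 1),
          if_pos (by omega : kk * mn + mn - 1 < p + c), if_pos (by omega : kk * mn + mn - 1 < p)]
        ring
    linarith [hsub]

theorem pv_main (m : Int) (hm : 0 < m) (k : Int) (score : List Int) :
    solution k m score = solution_alt k m score := by
  obtain ⟨mn, rfl⟩ : ∃ mn : Nat, m = (mn : Int) := ⟨m.toNat, (Int.toNat_of_nonneg hm.le).symm⟩
  have hmn : 0 < mn := by exact_mod_cast hm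
  simp only [solution, solution_alt]
  simp only [PySem.Dict.foldl_insert_getD_add_one_eq_counter, PySem.Dict.getD_counter,
    PySem.Dict.keys_counter]
  set desc := PySem.List.sorted score (fun x => x) true with hdesc
  have hlen : desc.length = score.length := PySem.List.length_sorted score (fun x => x) true
  -- A side: the per-box loop is the sum of box minima times m
  rw [hlen, PySem.Int.floordiv_natCast, PySem.List.foldl_add, PySem.List.pyRange_one]
  simp only [List.map_map, Int.sub_zero, Int.toNat_natCast, Function.comp_def, zero_add]
  rw [pv_sum_map_range]
  have hterm : ∀ kk ∈ Finset.range (score.length / mn),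
      PySem.List.pyGetD desc ((kk : Int) * (mn : Int) + (mn : Int) - 1) 0 * (mn : Int)
        = (if 0 ≤ kk * mn + mn - 1 then desc.getD (kk * mn + mn - 1) 0 * (mn : Int) else 0) := by
    intro kk _
    rw [if_pos (Nat.zero_le _)]
    have hcast : ((kk * mn + mn - 1 : Nat) : Int) = (kk : Int) * (mn : Int) + (mn : Int) - 1 := by
      rw [Nat.cast_sub (by nlinarith [Nat.zero_le (kk * mn)] : 1 ≤ kk * mn + mn)]
      push_cast; ring
    rw [← hcast, PySem.List.pyGetD_natCast]
  rw [Finset.sum_congr rfl hterm]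
  -- B side: the block walk computes the same sum, by the loop invariant from p = 0
  rw [← Nat.cast_mul]
  have hfold := pv_fold score desc mn score.length hmn hlen
    (PySem.List.sorted (PySem.Set.ofList score) (fun x => x) true) 0 0
    (by rw [List.drop_zero, hdesc]; exact pv_desc_blocks score)
  rw [Nat.cast_zero] at hfold
  rw [hfold, zero_add]

-- ===== VERDICT (by name: the statement is the Claim_ definition above) =====
theorem solution_spec : Claim_equal_solution := by
  intro k m score _ hpre
  unfold Spec_solution
  exact pv_main m hpre k score
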